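-- pv_equiv track=rewrite | github.com/itsUs3/Newest-ARK-Capstone | backend/models/neighborhood_engine.py | _parse_landmarks
-- ===== SOURCE A (Python) =====
-- from typing import List, Dict, Optional
--
-- def _parse_landmarks(landmark_list: Optional[List]) -> Dict[str, List[str]]:
--     """Parse a list of 'CODE|Name' strings into {code: [names]} dict."""
--     categorized: Dict[str, List[str]] = {}
--     for item in (landmark_list or []):
--         text = str(item)
--         if "|" in text:
--             code, name = text.split("|", 1)
--             code = code.strip()
--             name = name.strip()
--             if code not in categorized:
--                 categorized[code] = []
--             categorized[code].append(name)
--     return categorized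
-- ===== SOURCE B (Python) =====
-- def _parse_landmarks(landmark_list):
--     """Materialize (code, name) pairs once, then group per first-seen code."""
--     pairs = [
--         (code.strip(), name.strip())
--         for code, name in (s.split("|", 1) for s in (landmark_list or []) if "|" in s)
--     ]
--     codes = list(dict.fromkeys(code for code, _ in pairs))
--     return {code: [n for c, n in pairs if c == code] for code in codes}
-- ===== Notes on version B (the rewrite author's own statement) =====
-- stated objective: alternative
-- what changed: Replaces A's single pass with a running dict (membership test + insert + append per item) by a materialize-then-group shape: one comprehension collects all (code, name) pairs, dict.fromkeys yields the codes in first-encounter order, and a grouped comprehension builds each code's name list.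
import Mathlib
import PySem

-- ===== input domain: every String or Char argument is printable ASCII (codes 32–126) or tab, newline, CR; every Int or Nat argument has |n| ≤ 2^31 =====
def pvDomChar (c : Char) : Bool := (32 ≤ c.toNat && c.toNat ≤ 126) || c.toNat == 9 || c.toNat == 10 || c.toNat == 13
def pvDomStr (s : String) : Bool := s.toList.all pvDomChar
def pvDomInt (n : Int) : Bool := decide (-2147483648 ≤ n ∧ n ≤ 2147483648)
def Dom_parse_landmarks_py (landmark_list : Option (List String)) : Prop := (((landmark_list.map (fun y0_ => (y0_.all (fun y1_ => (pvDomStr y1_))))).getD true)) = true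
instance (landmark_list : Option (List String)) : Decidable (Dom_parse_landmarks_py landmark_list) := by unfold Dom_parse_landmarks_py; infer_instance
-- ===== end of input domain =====

-- B replaces A's running-dict single pass by a materialize-then-group decomposition (alternative, same cost class).

-- ===== PORT A =====
-- one loop iteration of A's for-loop (the 'some (code :: name :: _)' arm is the only one
-- reachable when "|" is in text: split("|", 1) then returns exactly two pieces)
def pvStepA (categorized : PySem.Dict String (List String)) (item : String) : PySem.Dict String (List String) :=
  let text := item
  if PySem.Str.isIn "|" text then
    match PySem.Str.splitMax? text "|" 1 with
    | some (code :: name :: _) =>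
      let code := PySem.Str.strip code
      let name := PySem.Str.strip name
      let categorized := if categorized.contains code then categorized else categorized.insert code []
      categorized.modify code [] (fun ns => ns ++ [name])
    | _ => categorized
  else categorized

def parse_landmarks_py (landmark_list : Option (List String)) : List (String × List String) :=
  ((landmark_list.getD []).foldl pvStepA PySem.Dict.empty).items

-- ===== PORT B =====
-- the per-item part of B's pairs comprehension: [] when the item is filtered out
def pvExtract (s : String) : List (String × String) :=
  if PySem.Str.isIn "|" s then
    match PySem.Str.splitMax? s "|" 1 with
    | some (code :: name :: _) => [(PySem.Str.strip code, PySem.Str.strip name)]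
    | _ => []
  else []

def parse_landmarks_py_alt (landmark_list : Option (List String)) : List (String × List String) :=
  let pairs := (landmark_list.getD []).flatMap pvExtract
  let codes := PySem.List.dedup (pairs.map (fun p => p.1))
  codes.map (fun code => (code, (pairs.filter (fun p => p.1 == code)).map (fun p => p.2)))

-- ===== PRECONDITION & SPEC =====
def Spec_parse_landmarks_py (landmark_list : Option (List String)) (out : List (String × List String)) : Prop := out = parse_landmarks_py_alt landmark_list
instance (landmark_list : Option (List String)) (out : List (String × List String)) : Decidable (Spec_parse_landmarks_py landmark_list out) := by unfold Spec_parse_landmarks_py; infer_instance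

-- ===== CLAIM (what is proved, stated in full; the proofs are below) =====
def Claim_equal_parse_landmarks_py : Prop := ∀ (landmark_list : Option (List String)), Dom_parse_landmarks_py landmark_list → Spec_parse_landmarks_py landmark_list (parse_landmarks_py landmark_list)

-- ===== LEMMAS AND PROOFS =====

-- A's 'if code not in d: d[code] = []' followed by 'd[code].append(name)' is one modify
theorem pvStepA_collapse (d : PySem.Dict String (List String)) (c n : String) :
    (if d.contains c then d else d.insert c []).modify c [] (fun ns => ns ++ [n])
      = d.modify c [] (fun ns => ns ++ [n]) := by
  cases hc : d.contains c with
  | true => simp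
  | false =>
    simp [PySem.Dict.modify, PySem.Dict.insert_insert_self,
      PySem.Dict.getD_of_not_contains d [] hc]

theorem pvStepA_eq (d : PySem.Dict String (List String)) (s : String) :
    pvStepA d s = (pvExtract s).foldl (fun d p => d.modify p.1 [] (fun ns => ns ++ [p.2])) d := by
  unfold pvStepA pvExtract
  by_cases h : PySem.Str.isIn "|" s = true
  · rw [if_pos h, if_pos h]
    cases hs : PySem.Str.splitMax? s "|" 1 with
    | none => simp
    | some parts =>
      cases parts with
      | nil => simp
      | cons c t =>
        cases t with
        | nil => simp
        | cons n t' => simpa using pvStepA_collapse d (PySem.Str.strip c) (PySem.Str.strip n)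
  · rw [if_neg h, if_neg h]; rfl

theorem foldA_eq (xs : List String) (d : PySem.Dict String (List String)) :
    xs.foldl pvStepA d
      = (xs.flatMap pvExtract).foldl (fun d p => d.modify p.1 [] (fun ns => ns ++ [p.2])) d := by
  induction xs generalizing d with
  | nil => rfl
  | cons s t ih => simp [List.foldl_cons, List.flatMap_cons, List.foldl_append, pvStepA_eq, ih]

theorem grouped_items (ps : List (String × String)) :
    (ps.foldl (fun d p => d.modify p.1 [] (fun ns => ns ++ [p.2])) PySem.Dict.empty).items
      = (PySem.List.dedup (ps.map (fun p => p.1))).map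
          (fun c => (c, (ps.filter (fun p => p.1 == c)).map (fun p => p.2))) := by
  have hkeys :
      (ps.foldl (fun d p => d.modify p.1 [] (fun ns => ns ++ [p.2])) PySem.Dict.empty).keys
        = PySem.List.dedup (ps.map (fun p => p.1)) := by
    rw [PySem.Dict.keys_foldl_modify_key ps (fun p => p.1) [] (fun _ p ns => ns ++ [p.2])]
    simp [PySem.Set.update_nil_left]
  have hnodup :
      (ps.foldl (fun d p => d.modify p.1 [] (fun ns => ns ++ [p.2])) PySem.Dict.empty).keys.Nodup := by
    exact PySem.Dict.nodup_keys_foldl_modify_key ps (fun p => p.1) [] (fun _ p ns => ns ++ [p.2])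
      PySem.Dict.empty (by simp)
  rw [PySem.Dict.items_eq_map_keys _ hnodup [], hkeys]
  refine List.map_congr_left (fun c _ => ?_)
  rw [PySem.Dict.getD_foldl_modify_append]
  simp

-- ===== VERDICT (by name: the statement is the Claim_ definition above) =====
theorem parse_landmarks_py_spec : Claim_equal_parse_landmarks_py := by
  intro landmark_list _
  unfold Spec_parse_landmarks_py parse_landmarks_py parse_landmarks_py_alt
  rw [foldA_eq, grouped_items]
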